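-- pv_equiv track=rewrite | github.com/ronenh24/farkle_simulation | src/farkle_simulation/components/utils.py | score_combination
-- ===== SOURCE A (Python) =====
-- from collections import Counter
--
-- def score_combination(dice_combination: tuple) -> int:
--     """
--     Calculate score of dice combination.
--     """
--     count = Counter(dice_combination)
--     score = 0
--     dice_used = 0
--
--     for die_value, cnt in count.items():
--         while cnt >= 3:
--             if die_value == 1:  # Three 1s.
--                 score += 1000
--             else:  # Three of a kind.
--                 score += die_value * 100
--
--             count[die_value] -= 3
--             cnt -= 3
--             dice_used += 3
--
--     score += count[1] * 100  # One 1.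
--     score += count[5] * 50  # One 5.
--     dice_used += count[1]
--     dice_used += count[5]
--
--     # Three pairs.
--     if len(count) == 3 and all(v == 2 for v in count.values()):
--         score = max(score, 750)
--         if score == 750:
--             dice_used = 6
--
--     if len(count) == 6:  # One of each kind.
--         score = max(score, 1000)
--         if score == 1000:
--             dice_used = 6
--
--     if dice_used < len(dice_combination):
--         score = 0
--
--     return score
-- ===== SOURCE B (Python) =====
-- from collections import Counter
--
-- def score_combination(dice_combination: tuple) -> int:
--     """
--     Calculate score of dice combination (one pass with divmod instead of
--     while-subtract loops; specials decided from leftover remainders).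
--     """
--     count = Counter(dice_combination)
--     n = len(dice_combination)
--     rems = [c % 3 for c in count.values()]
--
--     score = sum((c // 3) * (1000 if v == 1 else v * 100) for v, c in count.items())
--     score += (count[1] % 3) * 100 + (count[5] % 3) * 50
--     used = n - sum(rems) + count[1] % 3 + count[5] % 3
--
--     if len(count) == 3 and all(r == 2 for r in rems):
--         if score <= 750:
--             score, used = 750, 6
--     elif len(count) == 6 and score <= 1000:
--         score, used = 1000, 6
--
--     return score if used >= n else 0
-- ===== Notes on version B (the rewrite author's own statement) =====
-- stated objective: simpler
-- what changed: Replaces the per-value while-subtract-3 loops and in-place Counter mutation with a single arithmetic pass (cnt//3 triples, cnt%3 leftovers), computes dice_used as n minus the leftover remainders, and merges the two special-case overrides into one if/elif decided from the remainders.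
import Mathlib
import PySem

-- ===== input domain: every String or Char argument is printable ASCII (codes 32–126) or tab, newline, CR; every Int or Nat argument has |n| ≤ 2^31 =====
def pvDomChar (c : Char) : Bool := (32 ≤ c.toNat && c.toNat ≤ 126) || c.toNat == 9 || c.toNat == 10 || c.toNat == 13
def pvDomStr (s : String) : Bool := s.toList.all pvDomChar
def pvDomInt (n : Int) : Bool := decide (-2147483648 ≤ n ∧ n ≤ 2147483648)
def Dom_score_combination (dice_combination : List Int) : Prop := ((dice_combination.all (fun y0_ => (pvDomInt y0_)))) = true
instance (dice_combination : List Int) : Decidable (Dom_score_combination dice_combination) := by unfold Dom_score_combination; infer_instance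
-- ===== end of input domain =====

-- B replaces A's while-subtract-3 loops by one divmod pass over the counter and
-- decides the three-pairs / straight specials from the leftover remainders (objective: simpler).

-- ===== PORT A =====
-- the 'while cnt >= 3' loop body, literally (score += …; count[die] -= 3; cnt -= 3; dice_used += 3)
def pvWhileA (die : Int) (cnt : Int) (count : PySem.Dict Int Int) (score used : Int) :
    PySem.Dict Int Int × Int × Int :=
  if h : 3 ≤ cnt then
    pvWhileA die (cnt - 3) (count.modify die 0 (· - 3))
      (score + (if die == 1 then 1000 else die * 100)) (used + 3)
  else (count, score, used)
termination_by cnt.toNat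
decreasing_by omega

def score_combination (dice_combination : List Int) : Int :=
  let count := PySem.Dict.counter dice_combination
  let st := count.items.foldl
    (fun (st : PySem.Dict Int Int × Int × Int) kv => pvWhileA kv.1 kv.2 st.1 st.2.1 st.2.2)
    (count, (0 : Int), (0 : Int))
  let count := st.1
  let score := st.2.1 + count.getD 1 0 * 100 + count.getD 5 0 * 50
  let used := st.2.2 + count.getD 1 0 + count.getD 5 0
  let su :=
    if count.size == 3 && count.values.all (fun v => v == 2) then
      let score := max score 750
      (score, if score == 750 then (6 : Int) else used)
    else (score, used)
  let su :=
    if count.size == 6 then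
      let score := max su.1 1000
      (score, if score == 1000 then (6 : Int) else su.2)
    else su
  if su.2 < (dice_combination.length : Int) then 0 else su.1

-- ===== PORT B =====
def score_combination_alt (dice_combination : List Int) : Int :=
  let count := PySem.Dict.counter dice_combination
  let n : Int := dice_combination.length
  let rems := count.values.map (fun c => PySem.Int.mod c 3)
  let score := (count.items.map
    (fun kv => PySem.Int.floordiv kv.2 3 * (if kv.1 == 1 then 1000 else kv.1 * 100))).sum
  let score := score + PySem.Int.mod (count.getD 1 0) 3 * 100
                     + PySem.Int.mod (count.getD 5 0) 3 * 50
  let used := n - rems.sum + PySem.Int.mod (count.getD 1 0) 3 + PySem.Int.mod (count.getD 5 0) 3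
  let su :=
    if count.size == 3 && rems.all (fun r => r == 2) then
      if score ≤ 750 then ((750 : Int), (6 : Int)) else (score, used)
    else if count.size == 6 && score ≤ 1000 then ((1000 : Int), (6 : Int))
    else (score, used)
  if su.2 ≥ n then su.1 else 0

-- ===== PRECONDITION & SPEC =====
def Spec_score_combination (dice_combination : List Int) (out : Int) : Prop := out = score_combination_alt dice_combination
instance (dice_combination : List Int) (out : Int) : Decidable (Spec_score_combination dice_combination out) := by unfold Spec_score_combination; infer_instance

-- ===== CLAIM (what is proved, stated in full; the proofs are below) =====
def Claim_equal_score_combination : Prop := ∀ (dice_combination : List Int), Dom_score_combination dice_combination → Spec_score_combination dice_combination (score_combination dice_combination)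

-- ===== LEMMAS AND PROOFS =====

lemma pvModify_modify (d : PySem.Dict Int Int) (k : Int) (f g : Int → Int) :
    (d.modify k 0 f).modify k 0 g = d.modify k 0 (fun v => g (f v)) := by
  simp [PySem.Dict.modify, PySem.Dict.getD_insert_self, PySem.Dict.insert_insert_self]

lemma pvWhileA_spec (die : Int) : ∀ (n : Nat) (cnt : Int), cnt.toNat = n → 0 ≤ cnt →
    ∀ (count : PySem.Dict Int Int) (score used : Int),
    pvWhileA die cnt count score used =
      ((if 3 ≤ cnt then count.modify die 0 (· - 3 * PySem.Int.floordiv cnt 3) else count),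
       score + PySem.Int.floordiv cnt 3 * (if die == 1 then 1000 else die * 100),
       used + 3 * PySem.Int.floordiv cnt 3) := by
  intro n
  induction n using Nat.strong_induction_on with
  | _ n ih =>
    intro cnt hn h0 count score used
    rw [pvWhileA]
    have e3 : PySem.Int.floordiv cnt 3 = cnt / 3 := PySem.Int.floordiv_eq_ediv_of_pos (by norm_num)
    by_cases h3 : 3 ≤ cnt
    · have e3' : PySem.Int.floordiv (cnt - 3) 3 = cnt / 3 - 1 := by
        rw [PySem.Int.floordiv_eq_ediv_of_pos (by norm_num)]; omega
      rw [dif_pos h3, ih (cnt - 3).toNat (by omega) (cnt - 3) rfl (by omega), e3, e3',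
        if_pos h3]
      generalize (if (die == 1) = true then (1000 : Int) else die * 100) = b
      by_cases h6 : 3 ≤ cnt - 3
      · rw [if_pos h6, pvModify_modify]
        refine congrArg₂ Prod.mk ?_ (congrArg₂ Prod.mk (by ring) (by ring))
        congr 1; funext v; ring
      · rw [if_neg h6]
        have h1 : cnt / 3 = 1 := by omega
        rw [h1]
        refine congrArg₂ Prod.mk ?_ (congrArg₂ Prod.mk (by ring) (by ring))
        congr 1
    · rw [dif_neg h3, if_neg h3, e3]
      have h1 : cnt / 3 = 0 := by omega
      rw [h1]
      exact congrArg₂ Prod.mk rfl (congrArg₂ Prod.mk (by ring) (by ring))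

def pvLoopA (l : List (Int × Int)) (st : PySem.Dict Int Int × Int × Int) :
    PySem.Dict Int Int × Int × Int :=
  l.foldl (fun st kv => pvWhileA kv.1 kv.2 st.1 st.2.1 st.2.2) st

lemma pvLoopA_spec (l : List (Int × Int)) :
    ∀ (d : PySem.Dict Int Int) (s u : Int),
    (∀ p ∈ l, 0 ≤ p.2 ∧ d.contains p.1 = true) →
    (pvLoopA l (d, s, u)).2.1 =
        s + (l.map (fun p => PySem.Int.floordiv p.2 3 * (if p.1 == 1 then 1000 else p.1 * 100))).sum
    ∧ (pvLoopA l (d, s, u)).2.2 = u + (l.map (fun p => 3 * PySem.Int.floordiv p.2 3)).sum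
    ∧ (∀ v, (pvLoopA l (d, s, u)).1.getD v 0 =
        d.getD v 0 - 3 * (((l.filter (fun p => p.1 == v)).map (fun p => PySem.Int.floordiv p.2 3)).sum))
    ∧ (pvLoopA l (d, s, u)).1.keys = d.keys := by
  induction l with
  | nil => intro d s u _; simp [pvLoopA]
  | cons p rest ih =>
    intro d s u hl
    obtain ⟨hp0, hpc⟩ := hl p (by simp)
    have hstep := pvWhileA_spec p.1 p.2.toNat p.2 rfl hp0 d s u
    set d1 := (if 3 ≤ p.2 then d.modify p.1 0 (· - 3 * PySem.Int.floordiv p.2 3) else d) with hd1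
    have hd1getD : ∀ v, d1.getD v 0 =
        d.getD v 0 - (if p.1 == v then 3 * PySem.Int.floordiv p.2 3 else 0) := by
      intro v
      by_cases h3 : 3 ≤ p.2
      · rw [hd1, if_pos h3, PySem.Dict.getD_modify]
        by_cases hv : v = p.1
        · simp [hv]
        · simp [hv, beq_iff_eq, Ne.symm hv]
      · have hz : PySem.Int.floordiv p.2 3 = 0 := by
          rw [PySem.Int.floordiv_eq_ediv_of_pos (by norm_num)]; omega
        rw [hd1, if_neg h3, hz]
        split <;> simp
    have hd1keys : d1.keys = d.keys := by
      by_cases h3 : 3 ≤ p.2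
      · rw [hd1, if_pos h3]
        simp only [PySem.Dict.modify]
        exact PySem.Dict.keys_insert_of_contains _ _ hpc
      · simp [hd1, if_neg h3]
    have hd1contains : ∀ k, d.contains k = true → d1.contains k = true := by
      intro k hk
      rw [PySem.Dict.contains_iff_mem_keys] at hk ⊢
      rw [hd1keys]; exact hk
    have hrest := ih d1 (s + PySem.Int.floordiv p.2 3 * (if p.1 == 1 then 1000 else p.1 * 100))
        (u + 3 * PySem.Int.floordiv p.2 3)
        (fun q hq => ⟨(hl q (by simp [hq])).1, hd1contains _ (hl q (by simp [hq])).2⟩)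
    have hunf : pvLoopA (p :: rest) (d, s, u) =
        pvLoopA rest (d1, s + PySem.Int.floordiv p.2 3 * (if p.1 == 1 then 1000 else p.1 * 100),
          u + 3 * PySem.Int.floordiv p.2 3) := by
      simp only [pvLoopA, List.foldl_cons, hstep, hd1]
    rw [hunf]
    refine ⟨?_, ?_, ?_, ?_⟩
    · rw [hrest.1]; simp; ring
    · rw [hrest.2.1]; simp; ring
    · intro v
      rw [hrest.2.2.1 v, hd1getD v]
      by_cases hv : p.1 == v
      · simp [hv]; ring
      · simp [hv]
    · rw [hrest.2.2.2, hd1keys]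

lemma pvFilter_map_sum (v : Int) (g : Int × Int → Int) (f : Int → Int) :
    ∀ (ks : List Int), ks.Nodup →
    (((ks.map (fun k => (k, f k))).filter (fun p => p.1 == v)).map g).sum =
      if v ∈ ks then g (v, f v) else 0 := by
  intro ks
  induction ks with
  | nil => simp
  | cons k t ih =>
    intro hnd
    rw [List.nodup_cons] at hnd
    by_cases hk : k = v
    · subst hk
      have ht : (((t.map (fun k => (k, f k))).filter (fun p => p.1 == k)).map g).sum = 0 := by
        rw [ih hnd.2, if_neg hnd.1]
      simp [ht]
    · simp only [List.map_cons, List.filter_cons]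
      have : ((k, f k).1 == v) = false := by simp [hk]
      rw [this, if_neg (by simp), ih hnd.2]
      have hvk : ¬ v = k := fun h => hk h.symm
      by_cases hv : v ∈ t <;> simp [hv, List.mem_cons, hvk]

lemma pvCountSum (xs : List Int) :
    ((PySem.Set.ofList xs).map (fun k => ((xs.count k : Nat) : Int))).sum = (xs.length : Int) := by
  have hperm : (PySem.Set.ofList xs).Perm xs.dedup := by
    apply List.perm_of_nodup_nodup_toFinset_eq (PySem.Set.nodup_ofList xs) xs.nodup_dedup
    ext a
    simp [PySem.Set.mem_ofList, List.mem_dedup]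
  calc ((PySem.Set.ofList xs).map (fun k => ((xs.count k : Nat) : Int))).sum
      = (xs.dedup.map (fun k => ((xs.count k : Nat) : Int))).sum :=
        (hperm.map _).sum_eq
    _ = (((xs.dedup.map (fun k => (xs.count k : Nat))).map (fun n : Nat => (n : Int))).sum) := by
        rw [List.map_map]; rfl
    _ = (((xs.dedup.map (fun k => (xs.count k : Nat))).sum : Nat) : Int) := by
        rw [Nat.cast_list_sum]
    _ = (xs.length : Int) := by
        norm_cast
        exact List.sum_map_count_dedup_eq_length xs

-- ===== VERDICT (by name: the statement is the Claim_ definition above) =====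
set_option maxHeartbeats 1000000 in
theorem score_combination_spec : Claim_equal_score_combination := by
  unfold Claim_equal_score_combination Spec_score_combination
  intro xs _
  unfold score_combination score_combination_alt
  simp only []
  set c0 := PySem.Dict.counter xs with hc0
  have hitems : c0.items = (PySem.Set.ofList xs).map (fun k => (k, ((xs.count k : Nat) : Int))) :=
    PySem.Dict.items_counter xs
  have hl : ∀ p ∈ c0.items, 0 ≤ p.2 ∧ c0.contains p.1 = true := by
    intro p hp
    rw [hitems, List.mem_map] at hp
    obtain ⟨k, hk, rfl⟩ := hp
    constructor
    · positivity
    · rw [PySem.Dict.contains_iff_mem_keys, PySem.Dict.keys_counter]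
      exact hk
  have hspec := pvLoopA_spec c0.items c0 0 0 hl
  have hloop : c0.items.foldl
      (fun (st : PySem.Dict Int Int × Int × Int) kv => pvWhileA kv.1 kv.2 st.1 st.2.1 st.2.2)
      (c0, (0 : Int), (0 : Int)) = pvLoopA c0.items (c0, 0, 0) := rfl
  rw [hloop]
  set st := pvLoopA c0.items (c0, 0, 0) with hst
  -- final dict lookups
  have hgetD : ∀ v, st.1.getD v 0 = PySem.Int.mod ((xs.count v : Nat) : Int) 3 := by
    intro v
    rw [hspec.2.2.1 v, hitems,
      pvFilter_map_sum v _ _ _ (PySem.Set.nodup_ofList xs), PySem.Dict.getD_counter]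
    dsimp only
    by_cases hv : v ∈ PySem.Set.ofList xs
    · rw [if_pos hv]
      have := PySem.Int.floordiv_mul_add_mod ((xs.count v : Nat) : Int) 3
      omega
    · rw [if_neg hv]
      have h0 : xs.count v = 0 := by
        rw [PySem.Set.mem_ofList] at hv
        exact List.count_eq_zero.mpr hv
      rw [h0]
      norm_num
  have hkeys : st.1.keys = PySem.Set.ofList xs :=
    hspec.2.2.2.trans (PySem.Dict.keys_counter xs)
  have hndk : st.1.keys.Nodup := hkeys ▸ PySem.Set.nodup_ofList xs
  have hsize : st.1.size = (PySem.Set.ofList xs).length := by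
    rw [← hkeys]; simp [PySem.Dict.keys, PySem.Dict.size]
  have hsize0 : c0.size = (PySem.Set.ofList xs).length := by
    rw [hc0, ← PySem.Dict.keys_counter xs]; simp [PySem.Dict.keys, PySem.Dict.size]
  have hvals : st.1.values =
      (PySem.Set.ofList xs).map (fun k => PySem.Int.mod ((xs.count k : Nat) : Int) 3) := by
    rw [PySem.Dict.values_eq_map_keys st.1 hndk 0, hkeys]
    exact List.map_congr_left (fun k _ => hgetD k)
  have hrems : c0.values.map (fun c => PySem.Int.mod c 3) =
      (PySem.Set.ofList xs).map (fun k => PySem.Int.mod ((xs.count k : Nat) : Int) 3) := by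
    rw [PySem.Dict.values_eq_map_keys c0 (PySem.Dict.nodup_keys_counter xs) 0,
      PySem.Dict.keys_counter, List.map_map]
    exact List.map_congr_left (fun k _ => by simp only [Function.comp_apply, hc0, PySem.Dict.getD_counter])
  have husedA : (c0.items.map (fun p => 3 * PySem.Int.floordiv p.2 3)).sum =
      (xs.length : Int) -
        ((PySem.Set.ofList xs).map (fun k => PySem.Int.mod ((xs.count k : Nat) : Int) 3)).sum := by
    rw [hitems, List.map_map]
    have h1 : (((PySem.Set.ofList xs).map
          (fun k => 3 * PySem.Int.floordiv ((xs.count k : Nat) : Int) 3)).sum +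
        ((PySem.Set.ofList xs).map (fun k => PySem.Int.mod ((xs.count k : Nat) : Int) 3)).sum)
        = (xs.length : Int) := by
      rw [← PySem.List.sum_map_add_int]
      rw [List.map_congr_left (l := PySem.Set.ofList xs)
        (f := fun k => 3 * PySem.Int.floordiv ((xs.count k : Nat) : Int) 3 +
          PySem.Int.mod ((xs.count k : Nat) : Int) 3)
        (g := fun k => ((xs.count k : Nat) : Int))
        (fun k _ => by
          dsimp only
          have := PySem.Int.floordiv_mul_add_mod ((xs.count k : Nat) : Int) 3
          omega)]
      exact pvCountSum xs
    have h2 : (PySem.Set.ofList xs).map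
        ((fun p => 3 * PySem.Int.floordiv p.2 3) ∘ fun k => (k, ((xs.count k : Nat) : Int))) =
        (PySem.Set.ofList xs).map (fun k => 3 * PySem.Int.floordiv ((xs.count k : Nat) : Int) 3) :=
      rfl
    rw [h2]
    omega
  rw [hspec.1, hspec.2.1, hgetD 1, hgetD 5, hvals, hrems, hsize, hsize0,
    PySem.Dict.getD_counter, PySem.Dict.getD_counter, husedA]
  simp only [zero_add]
  set S := (List.map (fun p => PySem.Int.floordiv p.2 3 *
    if (p.1 == 1) = true then (1000 : Int) else p.1 * 100) c0.items).sum with hS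
  set M1 := PySem.Int.mod ((List.count 1 xs : Nat) : Int) 3 with hM1
  set M5 := PySem.Int.mod ((List.count 5 xs : Nat) : Int) 3 with hM5
  set R := (PySem.Set.ofList xs).map
    (fun k => PySem.Int.mod ((List.count k xs : Nat) : Int) 3) with hR
  set L := (PySem.Set.ofList xs).length with hL
  set n := (xs.length : Int) with hn
  clear hspec hl hloop hgetD hkeys hndk hsize hsize0 hvals hrems husedA hitems
  clear hS hM1 hM5 hR hL hn hst hc0
  clear_value S M1 M5 R L n
  clear st c0
  split_ifs <;> simp_all <;> omega
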